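-- pv_equiv track=rewrite | github.com/joshanashakya/dissertation | workspace/dataset/java-python/GeeksForGeeks/5229/A/2.py | smallestIndex
-- ===== SOURCE A (Python) =====
-- def smallestIndex(a, n):
--
--     # Initially
--     right1 = 0
--     right0 = 0
--
--     # Traverse in the array
--     for i in range(n):
--
--         # Check if array element is 1
--         if (a[i] == 1):
--             right1 = i
--
--         # a[i] = 0
--         else:
--             right0 = i
--
--     # Return minimum of both
--     return min(right1, right0)
-- ===== SOURCE B (Python) =====
-- def smallestIndex(a, n):
--     # The answer is the last index (below n) whose "class" (1 vs non-1) differs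
--     # from the class of the last element a[n-1]; if no such index exists
--     # (empty prefix or uniform class), the answer is 0.
--     if n <= 0:
--         return 0
--     cls = (a[n - 1] == 1)
--     i = n - 1
--     while i >= 0 and (a[i] == 1) == cls:
--         i -= 1
--     return i if i >= 0 else 0
-- ===== Notes on version B (the rewrite author's own statement) =====
-- stated objective: alternative
-- what changed: B drops the two last-index accumulators and the min entirely: since the larger of A's two indices is always n-1 (the class of the last element), B just skips the trailing run of a[n-1]'s class (1 vs non-1) and returns the index where the run ends, or 0 for an empty/uniform prefix.
import Mathlib
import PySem

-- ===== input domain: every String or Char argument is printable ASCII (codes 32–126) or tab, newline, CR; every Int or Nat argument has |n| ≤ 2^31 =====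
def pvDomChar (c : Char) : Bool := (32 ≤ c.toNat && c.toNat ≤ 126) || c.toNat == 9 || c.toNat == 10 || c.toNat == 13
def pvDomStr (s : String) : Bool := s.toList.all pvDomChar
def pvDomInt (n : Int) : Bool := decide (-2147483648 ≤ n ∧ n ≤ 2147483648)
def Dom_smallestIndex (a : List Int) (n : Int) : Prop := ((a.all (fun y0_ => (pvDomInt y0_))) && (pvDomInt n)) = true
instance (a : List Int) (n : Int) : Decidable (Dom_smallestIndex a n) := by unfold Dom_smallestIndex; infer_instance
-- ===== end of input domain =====

-- B replaces A's two running last-indices and the final min by skipping the trailing run of a[n-1]'s class; the return value is proved equal to A's.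

-- ===== PORT A =====
-- forward loop over range(n); a[i] is total on Pre_ (0 ≤ i < n ≤ len a), rendered by pyGetD
def smallestIndex (a : List Int) (n : Int) : Int :=
  let s := (PySem.List.pyRange 0 n 1).foldl
    (fun (st : Int × Int) i =>
      if PySem.List.pyGetD a i 0 == 1 then (i, st.2) else (st.1, i)) (0, 0)
  min s.1 s.2

-- ===== PORT B =====
-- while i >= 0 and (a[i] == 1) == cls: i -= 1
def siRun (a : List Int) (cls : Bool) (i : Int) : Int :=
  if h : 0 ≤ i then
    if (PySem.List.pyGetD a i 0 == 1) == cls then siRun a cls (i - 1) else i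
  else i
termination_by (i + 1).toNat
decreasing_by omega

def smallestIndex_alt (a : List Int) (n : Int) : Int :=
  if n ≤ 0 then 0
  else
    let cls := PySem.List.pyGetD a (n - 1) 0 == 1
    let i := siRun a cls (n - 1)
    if 0 ≤ i then i else 0

-- ===== PRECONDITION & SPEC =====
-- Pre_: exactly the inputs where Python A returns (a[i] is evaluated for 0 ≤ i < n, so n ≤ len(a); n ≤ 0 iterates nothing)
def Pre_smallestIndex (a : List Int) (n : Int) : Prop := n ≤ (a.length : Int)
instance (a : List Int) (n : Int) : Decidable (Pre_smallestIndex a n) := by unfold Pre_smallestIndex; infer_instance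
def pvWitness_smallestIndex : List Int × Int := ([0, 1, 1, 0], 4)

def Spec_smallestIndex (a : List Int) (n : Int) (out : Int) : Prop := out = smallestIndex_alt a n
instance (a : List Int) (n : Int) (out : Int) : Decidable (Spec_smallestIndex a n out) := by unfold Spec_smallestIndex; infer_instance

-- ===== CLAIM (what is proved, stated in full; the proofs are below) =====
def Claim_equal_smallestIndex : Prop := ∀ (a : List Int) (n : Int), Dom_smallestIndex a n → Pre_smallestIndex a n → Spec_smallestIndex a n (smallestIndex a n)

-- ===== LEMMAS AND PROOFS =====

-- first element of ys satisfying p, default d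
def firstM (p : Int → Bool) : List Int → Int → Int
  | [], d => d
  | i :: ys, d => if p i then i else firstM p ys d

theorem firstM_append (p : Int → Bool) (xs ys : List Int) (d : Int) :
    firstM p (xs ++ ys) d = firstM p xs (firstM p ys d) := by
  induction xs with
  | nil => rfl
  | cons x xs ih => simp [firstM]; split_ifs <;> simp [ih]

-- last match via foldl equals first match on the reverse
theorem foldl_last_eq_firstM_reverse (p : Int → Bool) (L : List Int) (d : Int) :
    L.foldl (fun r i => if p i then i else r) d = firstM p L.reverse d := by
  induction L generalizing d with
  | nil => rfl
  | cons i L ih =>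
      simp only [List.foldl_cons, List.reverse_cons, firstM_append, ih]
      rfl

-- the paired fold of A splits into two independent folds
theorem foldA_split (p : Int → Bool) (L : List Int) (s : Int × Int) :
    L.foldl (fun (st : Int × Int) i => if p i then (i, st.2) else (st.1, i)) s
      = (L.foldl (fun r i => if p i then i else r) s.1,
         L.foldl (fun r i => if p i then r else i) s.2) := by
  induction L generalizing s with
  | nil => rfl
  | cons i L ih => simp only [List.foldl_cons]; split_ifs <;> simpa using ih _

-- the 0-side fold is the 1-side fold for the negated predicate
theorem foldl_keep_neg (p : Int → Bool) (L : List Int) (d : Int) :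
    L.foldl (fun r i => if p i then r else i) d
      = L.foldl (fun r i => if (!p i) then i else r) d := by
  congr 1; funext r i; by_cases h : p i <;> simp [h]

-- firstM either ignores its default everywhere or returns it; a returned match is a member
theorem firstM_cases (p : Int → Bool) (ys : List Int) (d : Int) :
    (∀ d' : Int, firstM p ys d' = d') ∨
    (firstM p ys d ∈ ys ∧ ∀ d' : Int, firstM p ys d' = firstM p ys d) := by
  induction ys with
  | nil => exact Or.inl (fun _ => rfl)
  | cons x ys ih =>
      by_cases h : p x
      · exact Or.inr ⟨by simp [firstM, h], fun d' => by simp [firstM, h]⟩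
      · rcases ih with h1 | ⟨hm, hc⟩
        · exact Or.inl (fun d' => by simp [firstM, h, h1])
        · exact Or.inr ⟨by simp [firstM, h]; exact Or.inr hm,
            fun d' => by simp [firstM, h]; exact hc d'⟩

-- B's while loop is the first match (class ≠ cls) over the countdown list, default -1
theorem siRun_eq (a : List Int) (cls : Bool) :
    ∀ (m : Nat), siRun a cls ((m : Int) - 1)
      = firstM (fun j => !((PySem.List.pyGetD a j 0 == 1) == cls))
          (PySem.List.pyRange ((m : Int) - 1) (-1) (-1)) (-1) := by
  intro m
  induction m with
  | zero =>
      have h0 : ((0 : Nat) : Int) - 1 = -1 := by norm_num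
      rw [h0, siRun, PySem.List.pyRange_neg_one_eq_nil (le_refl (-1 : Int))]
      norm_num [firstM]
  | succ k ih =>
      have hi : ((k + 1 : Nat) : Int) - 1 = (k : Int) := by push_cast; omega
      rw [hi, PySem.List.pyRange_neg_one_cons (by omega : (-1:Int) < (k:Int)), siRun,
        dif_pos (by omega : (0:Int) ≤ (k:Int))]
      by_cases hp : ((PySem.List.pyGetD a (k:Int) 0 == 1) == cls) = true
      · rw [if_pos hp]
        simp only [firstM, hp, Bool.not_true, Bool.false_eq_true, if_false]
        exact ih
      · rw [if_neg hp]
        simp only [firstM]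
        rw [if_pos (by simpa using hp)]

theorem smallestIndex_agrees (a : List Int) (n : Int) :
    smallestIndex a n = smallestIndex_alt a n := by
  by_cases hn : n ≤ 0
  · simp only [smallestIndex, smallestIndex_alt, if_pos hn,
      PySem.List.pyRange_one_eq_nil hn, List.foldl_nil]
    norm_num
  · simp only [smallestIndex, smallestIndex_alt, if_neg hn]
    have hm : n - 1 = ((n.toNat : Int)) - 1 := by omega
    have hrev : (PySem.List.pyRange 0 n 1).reverse = PySem.List.pyRange (n-1) (-1) (-1) := by
      rw [PySem.List.pyRange_neg_one_eq_reverse]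
      norm_num
    have hsi := siRun_eq a (PySem.List.pyGetD a (n-1) 0 == 1) n.toNat
    rw [← hm] at hsi
    rw [foldA_split, foldl_keep_neg, foldl_last_eq_firstM_reverse,
      foldl_last_eq_firstM_reverse, hrev, hsi]
    rw [PySem.List.pyRange_neg_one_cons (by omega : (-1:Int) < n - 1)]
    have hmemL' : ∀ j ∈ PySem.List.pyRange (n-1-1) (-1) (-1), -1 < j ∧ j ≤ n - 1 - 1 := by
      intro j hj
      rw [PySem.List.mem_pyRange_neg_one] at hj
      exact hj
    by_cases hc : (PySem.List.pyGetD a (n-1) 0 == 1) = true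
    · simp only [firstM, hc]
      norm_num
      rcases firstM_cases (fun i => !(PySem.List.pyGetD a i 0 == 1))
          (PySem.List.pyRange (n-1-1) (-1) (-1)) (-1) with hdef | ⟨hmem, hcon⟩
      · rw [hdef, hdef]
        split_ifs <;> omega
      · rw [hcon 0]
        have := hmemL' _ hmem
        split_ifs <;> omega
    · have hcf : (PySem.List.pyGetD a (n-1) 0 == 1) = false := by
        cases h : (PySem.List.pyGetD a (n-1) 0 == 1) <;> simp_all
      simp only [firstM, hcf]
      norm_num
      rcases firstM_cases (fun i => PySem.List.pyGetD a i 0 == 1)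
          (PySem.List.pyRange (n-1-1) (-1) (-1)) (-1) with hdef | ⟨hmem, hcon⟩
      · rw [hdef, hdef]
        split_ifs <;> omega
      · rw [hcon 0]
        have := hmemL' _ hmem
        split_ifs <;> omega

-- ===== VERDICT (by name: the statement is the Claim_ definition above) =====
theorem smallestIndex_spec : Claim_equal_smallestIndex := by
  intro a n _ _
  unfold Spec_smallestIndex
  exact smallestIndex_agrees a n
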